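-- pv_equiv track=rewrite | github.com/ziadahmeddeveloper-ops/grad_project | AI-Cyber-Defender-main/preprocessing/url_lexical_preprocess.py | has_fake_brand_in_subdomain
-- ===== SOURCE A (Python) =====
-- KNOWN_BRANDS = [
--     "google", "facebook", "amazon", "microsoft",
--     "paypal", "apple", "netflix", "bank"
-- ]
--
-- def has_fake_brand_in_subdomain(domain: str) -> int:
--     parts = domain.split(".")
--
--
--     if len(parts) < 2:
--         return 0
--
--     main_domain = parts[-2]
--
--
--     subdomains = parts[:-2]
--
--     for brand in KNOWN_BRANDS:
--         if brand in subdomains and brand != main_domain: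
--             return 1
--
--     return 0
-- ===== SOURCE B (Python) =====
-- KNOWN_BRANDS = [
--     "google", "facebook", "amazon", "microsoft",
--     "paypal", "apple", "netflix", "bank"
-- ]
--
-- BRANDS_SORTED = sorted(KNOWN_BRANDS)
--
-- def has_fake_brand_in_subdomain(domain: str) -> int:
--     parts = domain.split(".")
--     if len(parts) < 2:
--         return 0
--     main_domain = parts[-2]
--     subs = sorted(parts[:-2])
--     # sorted-merge intersection of the brand list and the subdomain labels,
--     # skipping the brand equal to the main domain
--     i = 0
--     j = 0
--     while i < len(BRANDS_SORTED) and j < len(subs):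
--         b = BRANDS_SORTED[i]
--         if b == main_domain or b < subs[j]:
--             i += 1
--         elif b > subs[j]:
--             j += 1
--         else:
--             return 1
--     return 0
-- ===== Notes on version B (the rewrite author's own statement) =====
-- stated objective: alternative
-- what changed: Replaces the per-brand membership scan over the subdomain list with sort-then-merge: the subdomain labels are sorted and intersected with a pre-sorted brand list by a two-pointer merge walk that skips the brand equal to the main domain.
import Mathlib
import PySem

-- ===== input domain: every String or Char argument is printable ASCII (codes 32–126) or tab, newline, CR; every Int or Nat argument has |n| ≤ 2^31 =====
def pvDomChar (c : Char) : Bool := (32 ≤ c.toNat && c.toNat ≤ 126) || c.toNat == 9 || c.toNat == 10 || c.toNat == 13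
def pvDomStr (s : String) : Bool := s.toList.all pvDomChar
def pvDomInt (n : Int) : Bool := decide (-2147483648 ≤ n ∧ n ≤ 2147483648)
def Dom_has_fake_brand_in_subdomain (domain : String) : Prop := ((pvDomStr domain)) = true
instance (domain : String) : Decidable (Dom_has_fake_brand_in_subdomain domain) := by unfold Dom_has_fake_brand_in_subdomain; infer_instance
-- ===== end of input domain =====

-- B replaces A's per-brand membership scan by sort-then-merge: sort the subdomain labels and walk
-- them against a pre-sorted brand list with two pointers, skipping the main-domain brand; same result.

-- ===== PORT A =====
def knownBrands : List String :=
  ["google", "facebook", "amazon", "microsoft", "paypal", "apple", "netflix", "bank"]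

-- the 'for brand in KNOWN_BRANDS: if brand in subdomains and brand != main_domain: return 1' loop
def hfbLoop (brands subdomains : List String) (main_domain : String) : Int :=
  match brands with
  | [] => 0
  | b :: rest => if b ∈ subdomains ∧ b ≠ main_domain then 1 else hfbLoop rest subdomains main_domain

def has_fake_brand_in_subdomain (domain : String) : Int :=
  let parts := (PySem.Str.split? domain ".").getD []   -- separator "." ≠ "", so split? is always some
  if parts.length < 2 then 0
  else
    let main_domain := PySem.List.pyGetD parts (-2) ""   -- parts[-2]; in range since parts.length ≥ 2
    let subdomains := PySem.List.slice parts none (some (-2))  -- parts[:-2]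
    hfbLoop knownBrands subdomains main_domain

-- ===== PORT B =====
-- BRANDS_SORTED = sorted(KNOWN_BRANDS)
def brandsSorted : List String := PySem.List.sorted knownBrands (fun x => x) false

-- Source B's while loop advances two indices that only move forward; ported as structural
-- recursion on the corresponding list suffixes — exact, step for step.
def hfbMerge (bs ss : List String) (main_domain : String) : Int :=
  match bs, ss with
  | [], _ => 0
  | _ :: _, [] => 0
  | b :: bt, s :: st =>
    if b = main_domain ∨ b < s then hfbMerge bt (s :: st) main_domain
    else if s < b then hfbMerge (b :: bt) st main_domain
    else 1
termination_by bs.length + ss.length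

def has_fake_brand_in_subdomain_alt (domain : String) : Int :=
  let parts := (PySem.Str.split? domain ".").getD []   -- separator "." ≠ "", so split? is always some
  if parts.length < 2 then 0
  else
    let main_domain := PySem.List.pyGetD parts (-2) ""   -- parts[-2]; in range since parts.length ≥ 2
    let subs := PySem.List.sorted (PySem.List.slice parts none (some (-2))) (fun x => x) false  -- sorted(parts[:-2])
    hfbMerge brandsSorted subs main_domain

-- ===== PRECONDITION & SPEC =====
def Spec_has_fake_brand_in_subdomain (domain : String) (out : Int) : Prop := out = has_fake_brand_in_subdomain_alt domain
instance (domain : String) (out : Int) : Decidable (Spec_has_fake_brand_in_subdomain domain out) := by unfold Spec_has_fake_brand_in_subdomain; infer_instance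

-- ===== CLAIM (what is proved, stated in full; the proofs are below) =====
def Claim_equal_has_fake_brand_in_subdomain : Prop := ∀ (domain : String), Dom_has_fake_brand_in_subdomain domain → Spec_has_fake_brand_in_subdomain domain (has_fake_brand_in_subdomain domain)

-- ===== LEMMAS AND PROOFS =====

-- A's loop returns 1 exactly when some brand is a subdomain label other than the main domain.
theorem hfbLoop_eq (brands subs : List String) (main : String) :
    hfbLoop brands subs main =
      if ∃ b ∈ brands, b ∈ subs ∧ b ≠ main then 1 else 0 := by
  induction brands with
  | nil => simp [hfbLoop]
  | cons b rest ih =>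
    simp only [hfbLoop, ih]
    by_cases h : b ∈ subs ∧ b ≠ main
    · simp [h]
    · by_cases h2 : ∃ x ∈ rest, x ∈ subs ∧ x ≠ main
      · simp [h, h2]
      · simp only [h, h2, if_false]
        rw [if_neg]
        rintro ⟨x, hx, hxs⟩
        rcases List.mem_cons.mp hx with rfl | hx
        · exact h hxs
        · exact h2 ⟨x, hx, hxs⟩

-- B's merge walk on sorted lists decides the same existence property.
theorem hfbMerge_eq (bs ss : List String) (main : String)
    (hbs : bs.Pairwise (· ≤ ·)) (hss : ss.Pairwise (· ≤ ·)) :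
    hfbMerge bs ss main =
      if ∃ b ∈ bs, b ∈ ss ∧ b ≠ main then 1 else 0 := by
  induction bs generalizing ss with
  | nil => simp [hfbMerge]
  | cons b bt ihb =>
    induction ss with
    | nil => simp [hfbMerge]
    | cons s st ihs =>
      have hbt := (List.pairwise_cons.mp hbs).2
      have hb_le := (List.pairwise_cons.mp hbs).1
      have hst := (List.pairwise_cons.mp hss).2
      have hs_le := (List.pairwise_cons.mp hss).1
      simp only [hfbMerge]
      by_cases hcase : b = main ∨ b < s
      · rw [if_pos hcase, ihb (s :: st) hbt hss]
        congr 1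
        apply propext
        constructor
        · rintro ⟨x, hx, hxs⟩; exact ⟨x, List.mem_cons_of_mem _ hx, hxs⟩
        · rintro ⟨x, hx, hxm, hxne⟩
          rcases List.mem_cons.mp hx with rfl | hx
          · rcases hcase with rfl | hlt
            · exact absurd rfl hxne
            · exfalso
              rcases List.mem_cons.mp hxm with rfl | hxst
              · exact lt_irrefl x hlt
              · exact absurd (hs_le x hxst) (not_le.mpr hlt)
          · exact ⟨x, hx, hxm, hxne⟩
      · rw [if_neg hcase]
        rw [not_or] at hcase
        obtain ⟨hbm, hbs'⟩ := hcase
        by_cases hsb : s < b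
        · rw [if_pos hsb, ihs hst]
          congr 1
          apply propext
          constructor
          · rintro ⟨x, hx, hxm, hxne⟩; exact ⟨x, hx, List.mem_cons_of_mem _ hxm, hxne⟩
          · rintro ⟨x, hx, hxm, hxne⟩
            refine ⟨x, hx, ?_, hxne⟩
            rcases List.mem_cons.mp hxm with rfl | hxst
            · exfalso
              rcases List.mem_cons.mp hx with rfl | hxbt
              · exact lt_irrefl x hsb
              · exact absurd (hb_le x hxbt) (not_le.mpr hsb)
            · exact hxst
        · rw [if_neg hsb]
          have hbeq : b = s := le_antisymm (not_lt.mp hsb) (not_lt.mp hbs')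
          have : ∃ x ∈ b :: bt, x ∈ s :: st ∧ x ≠ main :=
            ⟨b, List.mem_cons_self, by rw [hbeq]; exact List.mem_cons_self, hbm⟩
          rw [if_pos this]

-- ===== VERDICT (by name: the statement is the Claim_ definition above) =====
theorem has_fake_brand_in_subdomain_spec : Claim_equal_has_fake_brand_in_subdomain := by
  intro domain _
  unfold Spec_has_fake_brand_in_subdomain has_fake_brand_in_subdomain has_fake_brand_in_subdomain_alt
  simp only []
  set parts := (PySem.Str.split? domain ".").getD [] with hp
  by_cases h : parts.length < 2
  · simp [h]
  · simp only [h, if_false]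
    rw [hfbLoop_eq, hfbMerge_eq]
    · congr 1
      apply propext
      constructor
      · rintro ⟨x, hx, hxm, hxne⟩
        exact ⟨x, by simpa [brandsSorted, PySem.List.mem_sorted] using hx,
               by simpa [PySem.List.mem_sorted] using hxm, hxne⟩
      · rintro ⟨x, hx, hxm, hxne⟩
        exact ⟨x, by simpa [brandsSorted, PySem.List.mem_sorted] using hx,
               by simpa [PySem.List.mem_sorted] using hxm, hxne⟩
    · simpa using PySem.List.sorted_pairwise knownBrands (fun x => x) (κ := String)
    · simpa using PySem.List.sorted_pairwise (PySem.List.slice parts none (some (-2))) (fun x => x) (κ := String)
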